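-- pv_equiv track=rewrite | github.com/AlexanderRDiaz/siena-coding-comp | src/2023/gold/seventh.py | generatePuzzle
-- ===== SOURCE A (Python) =====
-- def generatePuzzle(rows: int) -> list[list[int]]:
--     puzzle = [[] for _ in range(rows)]
--     row = 0
--     i = 1
--
--     while row < rows:
--         puzzle[row].append(i)
--         i += 1
--         if len(puzzle[row]) == row + 1:
--             row += 1
--
--     return puzzle
-- ===== SOURCE B (Python) =====
-- def generatePuzzle(rows: int) -> list[list[int]]:
--     puzzle = []
--     for r in range(rows):
--         start = r * (r + 1) // 2 + 1
--         puzzle.append(list(range(start, start + r + 1)))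
--     return puzzle
-- ===== Notes on version B (the rewrite author's own statement) =====
-- stated objective: simpler
-- what changed: Replaces A's flat while-loop state machine (a single value counter threaded across rows with append-and-check bookkeeping) by a per-row construction: each row r is list(range(start, start+r+1)) with its start computed in closed form as the triangular number r*(r+1)//2 + 1.
import Mathlib
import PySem

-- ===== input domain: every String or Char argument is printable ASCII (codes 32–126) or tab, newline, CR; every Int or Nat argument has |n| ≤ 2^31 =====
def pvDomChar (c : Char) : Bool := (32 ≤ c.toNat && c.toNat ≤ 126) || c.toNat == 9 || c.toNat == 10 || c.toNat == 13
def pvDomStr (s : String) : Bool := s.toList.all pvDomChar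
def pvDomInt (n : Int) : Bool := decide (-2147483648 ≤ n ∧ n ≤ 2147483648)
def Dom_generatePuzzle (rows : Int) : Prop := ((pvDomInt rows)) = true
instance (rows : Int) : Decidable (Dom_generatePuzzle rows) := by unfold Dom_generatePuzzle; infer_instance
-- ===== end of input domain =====

-- B replaces A's flat while-loop state machine (one counter threaded across rows) by a
-- row-by-row construction with a closed-form start index (objective: simpler).

-- ===== PORT A =====
-- fuel for the while loop: the loop appends exactly rows*(rows+1)/2 integers in total
-- (one per iteration); pvFuelA computes that triangular number recursively.
def pvFuelA : Nat → Nat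
  | 0 => 0
  | n + 1 => pvFuelA n + (n + 1)

-- the while loop, step for step; `row` is a loop counter starting at 0, so `row.toNat`
-- is exact for the indexing `puzzle[row]` (append = set at that index)
def pvLoopA (rows : Int) : Nat → List (List Int) → Int → Int → List (List Int)
  | 0, puzzle, _, _ => puzzle
  | fuel + 1, puzzle, row, i =>
    if row < rows then
      -- puzzle[row].append(i); the updated list is written out (no let) for the proofs below
      if (((puzzle.set row.toNat ((puzzle.getD row.toNat []) ++ [i])).getD row.toNat []).length : Int) = row + 1 then
        pvLoopA rows fuel (puzzle.set row.toNat ((puzzle.getD row.toNat []) ++ [i])) (row + 1) (i + 1)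
      else
        pvLoopA rows fuel (puzzle.set row.toNat ((puzzle.getD row.toNat []) ++ [i])) row (i + 1)
    else puzzle

def generatePuzzle (rows : Int) : List (List Int) :=
  let puzzle := (List.range rows.toNat).map (fun _ => ([] : List Int))  -- [[] for _ in range(rows)]
  pvLoopA rows (pvFuelA rows.toNat) puzzle 0 1

-- ===== PORT B =====
def generatePuzzle_alt (rows : Int) : List (List Int) :=
  (PySem.List.pyRange 0 rows 1).map (fun r =>
    let start := PySem.Int.floordiv (r * (r + 1)) 2 + 1   -- r*(r+1)//2 + 1
    PySem.List.pyRange start (start + r + 1) 1)            -- list(range(start, start+r+1))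

-- ===== PRECONDITION & SPEC =====
def Spec_generatePuzzle (rows : Int) (out : List (List Int)) : Prop := out = generatePuzzle_alt rows
instance (rows : Int) (out : List (List Int)) : Decidable (Spec_generatePuzzle rows out) := by unfold Spec_generatePuzzle; infer_instance

-- ===== CLAIM (what is proved, stated in full; the proofs are below) =====
def Claim_equal_generatePuzzle : Prop := ∀ (rows : Int), Dom_generatePuzzle rows → Spec_generatePuzzle rows (generatePuzzle rows)

-- ===== LEMMAS AND PROOFS =====

-- [i, i+1, …, i+d-1]
def pvRamp (i : Int) : Nat → List Int
  | 0 => []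
  | d + 1 => i :: pvRamp (i + 1) d

-- the rows produced starting at value i for row sizes r+1, r+2, …, r+m
def pvRows (i : Int) (r : Nat) : Nat → List (List Int)
  | 0 => []
  | m + 1 => pvRamp i (r + 1) :: pvRows (i + (r + 1)) (r + 1) m

-- fuel needed to fill rows r, r+1, …, r+m-1
def pvNeed (r : Nat) : Nat → Nat
  | 0 => 0
  | m + 1 => (r + 1) + pvNeed (r + 1) m

lemma pyRange_eq_ramp : ∀ (d : Nat) (a : Int), PySem.List.pyRange a (a + d) 1 = pvRamp a d := by
  intro d
  induction d with
  | zero => intro a; simp [pvRamp, PySem.List.pyRange_one_eq_nil]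
  | succ d ih =>
    intro a
    have hlt : a < a + ((d : Int) + 1) := by omega
    rw [show ((d + 1 : Nat) : Int) = (d : Int) + 1 by push_cast; ring,
        PySem.List.pyRange_one_cons hlt]
    have : a + ((d : Int) + 1) = (a + 1) + (d : Int) := by ring
    rw [this, ih (a + 1)]
    rfl

lemma pvLoopA_stop (rows : Int) (fuel : Nat) (p : List (List Int)) (row i : Int)
    (h : rows ≤ row) : pvLoopA rows fuel p row i = p := by
  cases fuel with
  | zero => rfl
  | succ f => simp [pvLoopA, not_lt.mpr h]

lemma pvLoopA_fill (rows : Int) (r : Nat) (hr : (r : Int) < rows) :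
    ∀ (d f : Nat) (cur : List Int) (done pend : List (List Int)) (i : Int),
      done.length = r → cur.length + (d + 1) = r + 1 →
      pvLoopA rows (f + (d + 1)) (done ++ cur :: pend) r i
        = pvLoopA rows f (done ++ (cur ++ pvRamp i (d + 1)) :: pend) ((r : Int) + 1) (i + (d + 1)) := by
  intro d
  induction d with
  | zero =>
    intro f cur done pend i hlen hcur
    show pvLoopA rows (f + 1) _ _ _ = _
    rw [pvLoopA]
    rw [if_pos hr]
    have ht : ((r : Int)).toNat = r := Int.toNat_natCast r
    have hget : (done ++ cur :: pend).getD ((r : Int)).toNat [] = cur := by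
      rw [ht, ← hlen]
      simp [List.getD]
    have hset : (done ++ cur :: pend).set ((r : Int)).toNat (cur ++ [i]) = done ++ (cur ++ [i]) :: pend := by
      rw [ht, ← hlen, List.set_append_right _ _ (le_refl done.length)]
      simp
    have hgot : (done ++ (cur ++ [i]) :: pend).getD ((r : Int)).toNat [] = cur ++ [i] := by
      rw [ht, ← hlen]
      simp [List.getD]
    rw [hget, hset, hgot]
    have hc : ((cur ++ [i]).length : Int) = (r : Int) + 1 := by
      simp; omega
    rw [if_pos hc]
    have : pvRamp i 1 = [i] := rfl
    rw [this]
    norm_num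
  | succ d ih =>
    intro f cur done pend i hlen hcur
    show pvLoopA rows (f + (d + 2)) _ _ _ = _
    have hstep : f + (d + 2) = (f + (d + 1)) + 1 := by omega
    rw [hstep, pvLoopA, if_pos hr]
    have ht : ((r : Int)).toNat = r := Int.toNat_natCast r
    have hget : (done ++ cur :: pend).getD ((r : Int)).toNat [] = cur := by
      rw [ht, ← hlen]
      simp [List.getD]
    have hset : (done ++ cur :: pend).set ((r : Int)).toNat (cur ++ [i]) = done ++ (cur ++ [i]) :: pend := by
      rw [ht, ← hlen, List.set_append_right _ _ (le_refl done.length)]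
      simp
    have hgot : (done ++ (cur ++ [i]) :: pend).getD ((r : Int)).toNat [] = cur ++ [i] := by
      rw [ht, ← hlen]
      simp [List.getD]
    rw [hget, hset, hgot]
    have hc : ¬ (((cur ++ [i]).length : Int) = (r : Int) + 1) := by
      simp; omega
    rw [if_neg hc]
    have := ih f (cur ++ [i]) done pend (i + 1) hlen (by simp; omega)
    rw [this]
    have hcat : (cur ++ [i]) ++ pvRamp (i + 1) (d + 1) = cur ++ pvRamp i (d + 2) := by
      show _ = cur ++ (i :: pvRamp (i + 1) (d + 1))
      simp
    rw [hcat]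
    congr 1
    push_cast
    ring

lemma pvLoopA_all (rows : Int) :
    ∀ (m r : Nat) (done : List (List Int)) (i : Int),
      (r : Int) + m = rows → done.length = r →
      pvLoopA rows (pvNeed r m) (done ++ List.replicate m []) r i
        = done ++ pvRows i r m := by
  intro m
  induction m with
  | zero =>
    intro r done i hrm hlen
    simp only [List.replicate, pvRows, pvNeed, List.append_nil]
    exact pvLoopA_stop rows 0 done r i (by omega)
  | succ m ih =>
    intro r done i hrm hlen
    have hr : (r : Int) < rows := by push_cast at hrm ⊢; omega
    have hrep : List.replicate (m + 1) ([] : List Int) = [] :: List.replicate m [] := rfl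
    have hneed : pvNeed r (m + 1) = pvNeed (r + 1) m + (r + 1) := by
      simp [pvNeed]; omega
    rw [hrep, hneed]
    rw [pvLoopA_fill rows r hr r (pvNeed (r + 1) m) [] done (List.replicate m []) i hlen (by simp)]
    simp only [List.nil_append]
    have hcast : (r : Int) + 1 = ((r + 1 : Nat) : Int) := by push_cast; ring
    rw [hcast]
    have := ih (r + 1) (done ++ [pvRamp i (r + 1)]) (i + ((r : Int) + 1))
      (by push_cast at hrm ⊢; omega) (by simp [hlen])
    rw [show done ++ pvRamp i (r + 1) :: List.replicate m [] = (done ++ [pvRamp i (r + 1)]) ++ List.replicate m [] by simp] at *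
    rw [show i + ((r : Int) + 1) = i + ((r : Nat) + 1 : Nat) by push_cast; ring] at *
    rw [this]
    simp [pvRows]

lemma pvFuelA_eq_need : ∀ n : Nat, pvFuelA n = pvNeed 0 n := by
  have key : ∀ (m r : Nat), pvNeed r m = pvFuelA (r + m) - pvFuelA r := by
    intro m
    induction m with
    | zero => intro r; simp [pvNeed]
    | succ m ih =>
      intro r
      have h1 : pvFuelA (r + 1) = pvFuelA r + (r + 1) := rfl
      have hmono : pvFuelA (r + 1) ≤ pvFuelA (r + 1 + m) := by
        clear ih h1
        induction m with
        | zero => simp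
        | succ m ih2 =>
          have : pvFuelA (r + 1 + (m + 1)) = pvFuelA (r + 1 + m) + (r + 1 + m + 1) := rfl
          omega
      have h2 := ih (r + 1)
      simp only [pvNeed]
      rw [h2]
      have : r + 1 + m = r + (m + 1) := by omega
      rw [this] at h2 hmono ⊢
      omega
  intro n
  rw [key n 0]
  simp [pvFuelA]

-- A's result in closed form
lemma generatePuzzle_eq_rows (rows : Int) :
    generatePuzzle rows = pvRows 1 0 rows.toNat := by
  unfold generatePuzzle
  have hmap : (List.range rows.toNat).map (fun _ => ([] : List Int)) = List.replicate rows.toNat [] := by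
    simp [List.map_const']
  rw [hmap, pvFuelA_eq_need]
  rcases (by omega : rows ≤ 0 ∨ 0 < rows) with h | h
  · have h0 : rows.toNat = 0 := Int.toNat_of_nonpos h
    rw [h0]
    simp only [List.replicate, pvRows, pvNeed]
    exact pvLoopA_stop rows 0 [] 0 1 h
  · have := pvLoopA_all rows rows.toNat 0 ([] : List (List Int)) 1
      (by simp [Int.toNat_of_nonneg (le_of_lt h)]) rfl
    simp only [List.nil_append, Nat.cast_zero] at this
    exact this

-- triangular numbers, needed for B's closed-form start
def pvTriI (r : Nat) : Int := ((r * (r + 1)) / 2 : Nat)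

lemma pvTriI_two_mul (r : Nat) : 2 * pvTriI r = (r : Int) * ((r : Int) + 1) := by
  unfold pvTriI
  have h : 2 * ((r * (r + 1)) / 2) = r * (r + 1) := Nat.two_mul_div_two_of_even (Nat.even_mul_succ_self r)
  calc (2 : Int) * (((r * (r + 1)) / 2 : Nat) : Int)
      = ((2 * ((r * (r + 1)) / 2) : Nat) : Int) := by push_cast; ring
    _ = ((r * (r + 1) : Nat) : Int) := by rw [h]
    _ = (r : Int) * ((r : Int) + 1) := by push_cast; ring

lemma pvTriI_succ (r : Nat) : pvTriI (r + 1) = pvTriI r + (r + 1) := by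
  have h1 := pvTriI_two_mul r
  have h2 := pvTriI_two_mul (r + 1)
  have h3 : ((r + 1 : Nat) : Int) * (((r + 1 : Nat) : Int) + 1) = (r : Int) * ((r : Int) + 1) + 2 * ((r : Int) + 1) := by push_cast; ring
  rw [h3] at h2
  omega

-- B's result in closed form
lemma generatePuzzle_alt_eq_rows (rows : Int) :
    generatePuzzle_alt rows = pvRows 1 0 rows.toNat := by
  unfold generatePuzzle_alt
  rw [PySem.List.pyRange_one]
  simp only [sub_zero, List.map_map]
  have main : ∀ (m r : Nat) (i : Int), i = pvTriI r + 1 →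
      pvRows i r m = (List.range m).map (fun (j : Nat) =>
        (fun k : Int => PySem.List.pyRange (PySem.Int.floordiv (k * (k + 1)) 2 + 1)
          (PySem.Int.floordiv (k * (k + 1)) 2 + 1 + k + 1) 1) ((r : Int) + (j : Int))) := by
    intro m
    induction m with
    | zero => intro r i _; simp [pvRows]
    | succ m ih =>
      intro r i hi
      have hfd : PySem.Int.floordiv ((r : Int) * ((r : Int) + 1)) 2 = pvTriI r := by
        rw [← pvTriI_two_mul r, PySem.Int.floordiv_eq_ediv_of_pos (by norm_num)]
        exact Int.mul_ediv_cancel_left _ (by norm_num)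
      have hrow : PySem.List.pyRange (pvTriI r + 1) (pvTriI r + 1 + (r : Int) + 1) 1 = pvRamp i (r + 1) := by
        have hb : pvTriI r + 1 + (r : Int) + 1 = (pvTriI r + 1) + ((r + 1 : Nat) : Int) := by push_cast; ring
        rw [hb, pyRange_eq_ramp (r + 1) (pvTriI r + 1), hi]
      rw [List.range_succ_eq_map, List.map_cons, List.map_map]
      simp only [pvRows]
      congr 1
      · simp only [Int.natCast_zero, add_zero]
        rw [hfd]
        exact hrow.symm
      · rw [show i + ((r : Int) + 1) = i + ((r + 1 : Nat) : Int) by push_cast; ring]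
        rw [ih (r + 1) (i + ((r + 1 : Nat) : Int)) (by rw [hi, pvTriI_succ]; push_cast; ring)]
        apply List.map_congr_left
        intro j _
        simp only [Function.comp_apply]
        rw [show ((r + 1 : Nat) : Int) + (j : Int) = (r : Int) + ((Nat.succ j : Nat) : Int) by push_cast; ring]
  have h0 : (1 : Int) = pvTriI 0 + 1 := by simp [pvTriI]
  rw [main rows.toNat 0 1 h0]
  apply List.map_congr_left
  intro j _
  simp

-- ===== VERDICT (by name: the statement is the Claim_ definition above) =====
theorem generatePuzzle_spec : Claim_equal_generatePuzzle := by
  intro rows _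
  unfold Spec_generatePuzzle
  rw [generatePuzzle_eq_rows, generatePuzzle_alt_eq_rows]
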